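-- pv_equiv track=rewrite | github.com/santoshphilip/eppy | eppy/EPlusInterfaceFunctions/parse_idd.py | getobjectref
-- ===== SOURCE A (Python) =====
-- def getobjectref(blocklst, commdct):
--     """
--     makes a dictionary of object-lists
--     each item in the dictionary points to a list of tuples
--     the tuple is (objectname,  fieldindex)
--     """
--     objlst_dct = {}
--     for eli in commdct:
--         for elj in eli:
--             if "object-list" in elj:
--                 objlist = elj["object-list"][0]
--                 objlst_dct[objlist] = []
--
--     for objlist in list(objlst_dct.keys()):
--         for i in range(len(commdct)):
--             for j in range(len(commdct[i])):
--                 if "reference" in commdct[i][j]: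
--                     for ref in commdct[i][j]["reference"]:
--                         if ref == objlist:
--                             objlst_dct[objlist].append((blocklst[i][0], j))
--     return objlst_dct
-- ===== SOURCE B (Python) =====
-- def getobjectref(blocklst, commdct):
--     """Build a reference->[(i,j)] index once, then give each object-list key its looked-up entry list."""
--     ref_index = {}
--     for i, eli in enumerate(commdct):
--         for j, elj in enumerate(eli):
--             if "reference" in elj:
--                 for ref in elj["reference"]:
--                     ref_index.setdefault(ref, []).append((i, j))
--     objlst_dct = {}
--     for eli in commdct:
--         for elj in eli:
--             if "object-list" in elj:
--                 objlist = elj["object-list"][0]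
--                 objlst_dct[objlist] = [(blocklst[i][0], j)
--                                        for (i, j) in ref_index.get(objlist, [])]
--     return objlst_dct
-- ===== Notes on version B (the rewrite author's own statement) =====
-- stated objective: alternative
-- what changed: Instead of rescanning all of commdct once per object-list key, B builds a reference->[(i,j)] index in one pass over commdct and then assigns each object-list key its looked-up (and name-resolved) entry list, preserving key order, value order, multiplicity and empty defaults.
import Mathlib
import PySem

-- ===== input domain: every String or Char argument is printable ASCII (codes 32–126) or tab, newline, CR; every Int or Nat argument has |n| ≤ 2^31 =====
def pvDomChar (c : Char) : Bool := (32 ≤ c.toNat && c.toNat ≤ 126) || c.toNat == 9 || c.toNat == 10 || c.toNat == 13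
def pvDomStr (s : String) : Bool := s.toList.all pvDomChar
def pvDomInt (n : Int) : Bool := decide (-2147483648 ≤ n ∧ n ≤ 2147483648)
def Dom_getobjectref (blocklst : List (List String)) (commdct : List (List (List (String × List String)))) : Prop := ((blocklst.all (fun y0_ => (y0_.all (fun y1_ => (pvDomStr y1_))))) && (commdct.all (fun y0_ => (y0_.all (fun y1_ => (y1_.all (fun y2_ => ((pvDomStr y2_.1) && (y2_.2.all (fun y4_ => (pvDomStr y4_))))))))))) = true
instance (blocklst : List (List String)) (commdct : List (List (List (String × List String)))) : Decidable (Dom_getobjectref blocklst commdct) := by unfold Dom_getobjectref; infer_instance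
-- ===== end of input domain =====

-- B replaces A's per-key full rescans of commdct by one reference->[(i,j)] index pass plus per-key lookups (return value only).

-- ===== PORT A =====
def getobjectref (blocklst : List (List String)) (commdct : List (List (List (String × List String)))) : List (String × List (String × Int)) :=
  let d0 : PySem.Dict String (List (String × Int)) :=
    commdct.foldl (fun d eli =>
      eli.foldl (fun d elj =>
        match (PySem.Dict.mk elj).get? "object-list" with
        | some v =>
          match PySem.List.pyGet? v 0 with
          | some objlist => d.insert objlist []
          | none => d            -- Python raises IndexError here; excluded by Pre_
        | none => d) d) PySem.Dict.empty
  let d1 : PySem.Dict String (List (String × Int)) :=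
    d0.keys.foldl (fun d objlist =>
      (PySem.List.pyRange 0 (commdct.length : Int) 1).foldl (fun d i =>
        (PySem.List.pyRange 0 ((PySem.List.pyGetD commdct i []).length : Int) 1).foldl (fun d j =>
          match (PySem.Dict.mk (PySem.List.pyGetD (PySem.List.pyGetD commdct i []) j [])).get? "reference" with
          | some refs =>
            refs.foldl (fun d ref =>
              if ref = objlist then
                -- blocklst[i][0]: total via pyGetD; in range under Pre_ (Python raises otherwise)
                d.modify objlist [] (fun l => l ++ [(PySem.List.pyGetD (PySem.List.pyGetD blocklst i []) 0 "", j)])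
              else d) d
          | none => d) d) d) d0
  d1.items

-- ===== PORT B =====
def getobjectref_alt (blocklst : List (List String)) (commdct : List (List (List (String × List String)))) : List (String × List (String × Int)) :=
  let refIndex : PySem.Dict String (List (Int × Int)) :=
    (PySem.List.enumerate commdct 0).foldl (fun d p =>
      (PySem.List.enumerate p.2 0).foldl (fun d q =>
        match (PySem.Dict.mk q.2).get? "reference" with
        | some refs =>
          refs.foldl (fun d ref => d.modify ref [] (fun l => l ++ [(p.1, q.1)])) d   -- setdefault(ref, []).append((i, j))
        | none => d) d) PySem.Dict.empty
  let out : PySem.Dict String (List (String × Int)) :=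
    commdct.foldl (fun d eli =>
      eli.foldl (fun d elj =>
        match (PySem.Dict.mk elj).get? "object-list" with
        | some v =>
          match PySem.List.pyGet? v 0 with
          | some objlist =>
            d.insert objlist ((refIndex.getD objlist []).map
              (fun p => (PySem.List.pyGetD (PySem.List.pyGetD blocklst p.1 []) 0 "", p.2)))
          | none => d            -- Python raises IndexError here; excluded by Pre_
        | none => d) d) PySem.Dict.empty
  out.items

-- ===== PRECONDITION & SPEC =====
-- is `ref` the first element of some field's "object-list" value (i.e. a key of A's dictionary)?
def pvIsKey (commdct : List (List (List (String × List String)))) (ref : String) : Bool :=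
  commdct.any fun eli => eli.any fun elj =>
    match (PySem.Dict.mk elj).get? "object-list" with
    | some v => v.head? == some ref
    | none => false

-- Pre_ excludes exactly the inputs on which Python A raises an IndexError: an "object-list" value that is
-- the empty list (elj["object-list"][0]), or a referenced object-list key occurring in row i of commdct
-- while blocklst[i][0] does not exist.
def Pre_getobjectref (blocklst : List (List String)) (commdct : List (List (List (String × List String)))) : Prop :=
  ((commdct.all fun eli => eli.all fun elj =>
      match (PySem.Dict.mk elj).get? "object-list" with
      | some v => !v.isEmpty
      | none => true)
   && ((PySem.List.enumerate commdct 0).all fun p => p.2.all fun elj =>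
      match (PySem.Dict.mk elj).get? "reference" with
      | some refs =>
        !(refs.any (pvIsKey commdct)) ||
          (match PySem.List.pyGet? blocklst p.1 with
           | some row => !row.isEmpty
           | none => false)
      | none => true)) = true
instance (blocklst : List (List String)) (commdct : List (List (List (String × List String)))) : Decidable (Pre_getobjectref blocklst commdct) := by unfold Pre_getobjectref; infer_instance

def pvWitness_getobjectref : List (List String) × (List (List (List (String × List String)))) :=
  ([["B1", "z"], ["B2"]],
   [[[("object-list", ["RefA"]), ("x", [])], [("reference", ["RefA", "Other"])]],
    [[("reference", ["RefA", "RefA"])], [("object-list", ["RefB"])]]])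

def Spec_getobjectref (blocklst : List (List String)) (commdct : List (List (List (String × List String)))) (out : List (String × List (String × Int))) : Prop := out = getobjectref_alt blocklst commdct
instance (blocklst : List (List String)) (commdct : List (List (List (String × List String)))) (out : List (String × List (String × Int))) : Decidable (Spec_getobjectref blocklst commdct out) := by unfold Spec_getobjectref; infer_instance

-- ===== CLAIM (what is proved, stated in full; the proofs are below) =====
def Claim_equal_getobjectref : Prop := ∀ (blocklst : List (List String)) (commdct : List (List (List (String × List String)))), Dom_getobjectref blocklst commdct → Pre_getobjectref blocklst commdct → Spec_getobjectref blocklst commdct (getobjectref blocklst commdct)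

-- ===== LEMMAS AND PROOFS =====

-- proof-side names for the pieces of the two ports (all equal to the ports' folds by rfl)

-- the shared key-discovery pass, abstracted over the value inserted with each key
def pvPass (commdct : List (List (List (String × List String)))) (F : String → List (String × Int)) :
    PySem.Dict String (List (String × Int)) :=
  commdct.foldl (fun d eli =>
    eli.foldl (fun d elj =>
      match (PySem.Dict.mk elj).get? "object-list" with
      | some v =>
        match PySem.List.pyGet? v 0 with
        | some objlist => d.insert objlist (F objlist)
        | none => d
      | none => d) d) PySem.Dict.empty

def pvRefIndex (commdct : List (List (List (String × List String)))) : PySem.Dict String (List (Int × Int)) :=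
  (PySem.List.enumerate commdct 0).foldl (fun d p =>
    (PySem.List.enumerate p.2 0).foldl (fun d q =>
      match (PySem.Dict.mk q.2).get? "reference" with
      | some refs =>
        refs.foldl (fun d ref => d.modify ref [] (fun l => l ++ [(p.1, q.1)])) d
      | none => d) d) PySem.Dict.empty

def pvInnerA (blocklst : List (List String)) (commdct : List (List (List (String × List String))))
    (objlist : String) (d : PySem.Dict String (List (String × Int))) : PySem.Dict String (List (String × Int)) :=
  (PySem.List.pyRange 0 (commdct.length : Int) 1).foldl (fun d i =>
    (PySem.List.pyRange 0 ((PySem.List.pyGetD commdct i []).length : Int) 1).foldl (fun d j =>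
      match (PySem.Dict.mk (PySem.List.pyGetD (PySem.List.pyGetD commdct i []) j [])).get? "reference" with
      | some refs =>
        refs.foldl (fun d ref =>
          if ref = objlist then
            d.modify objlist [] (fun l => l ++ [(PySem.List.pyGetD (PySem.List.pyGetD blocklst i []) 0 "", j)])
          else d) d
      | none => d) d) d

-- the (i, j) occurrences of key k among "reference" values, in A's (and B's) traversal order
def pvCollect (commdct : List (List (List (String × List String)))) (k : String) : List (Int × Int) :=
  (PySem.List.pyRange 0 (commdct.length : Int) 1).flatMap (fun i =>
    (PySem.List.pyRange 0 ((PySem.List.pyGetD commdct i []).length : Int) 1).flatMap (fun j =>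
      match (PySem.Dict.mk (PySem.List.pyGetD (PySem.List.pyGetD commdct i []) j [])).get? "reference" with
      | some refs => refs.flatMap (fun ref => if ref = k then [(i, j)] else [])
      | none => []))

def pvResolve (blocklst : List (List String)) (l : List (Int × Int)) : List (String × Int) :=
  l.map (fun p => (PySem.List.pyGetD (PySem.List.pyGetD blocklst p.1 []) 0 "", p.2))

-- generic fold shapes
theorem pvFoldlRel {α β γ : Type} (R : β → γ → Prop) (s1 : β → α → β) (s2 : γ → α → γ)
    (h : ∀ b c x, R b c → R (s1 b x) (s2 c x)) :
    ∀ (l : List α) (b : β) (c : γ), R b c → R (l.foldl s1 b) (l.foldl s2 c) := by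
  intro l
  induction l with
  | nil => intro b c hbc; simpa using hbc
  | cons x xs ih => intro b c hbc; exact ih _ _ (h _ _ _ hbc)

theorem pvFoldlInv {α β : Type} (P : β → Prop) (s : β → α → β)
    (h : ∀ b x, P b → P (s b x)) :
    ∀ (l : List α) (b : β), P b → P (l.foldl s b) := by
  intro l
  induction l with
  | nil => intro b hb; simpa using hb
  | cons x xs ih => intro b hb; exact ih _ (h _ _ hb)

theorem pvFoldlAppend {α β : Type} (step : PySem.Dict String (List β) → α → PySem.Dict String (List β))
    (k : String) (g : α → List β)
    (hs : ∀ d x, (step d x).getD k [] = d.getD k [] ++ g x) :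
    ∀ (l : List α) d, (l.foldl step d).getD k [] = d.getD k [] ++ l.flatMap g := by
  intro l
  induction l with
  | nil => intro d; simp
  | cons x xs ih => intro d; rw [List.foldl_cons, ih, hs, List.flatMap_cons, List.append_assoc]

theorem pvFoldlKeys {α β : Type} (step : PySem.Dict String β → α → PySem.Dict String β)
    (k : String) (hs : ∀ d x, k ∈ d.keys → (step d x).keys = d.keys) :
    ∀ (l : List α) d, k ∈ d.keys → (l.foldl step d).keys = d.keys := by
  intro l
  induction l with
  | nil => intro d _; simp
  | cons x xs ih =>
    intro d hk
    rw [List.foldl_cons, ih _ (by rw [hs d x hk]; exact hk), hs d x hk]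

-- ports in terms of the proof-side pieces
theorem portA_eq (blocklst commdct) :
    getobjectref blocklst commdct =
      ((pvPass commdct (fun _ => [])).keys.foldl
        (fun d objlist => pvInnerA blocklst commdct objlist d) (pvPass commdct (fun _ => []))).items := rfl

theorem portB_eq (blocklst commdct) :
    getobjectref_alt blocklst commdct =
      (pvPass commdct (fun k => pvResolve blocklst ((pvRefIndex commdct).getD k []))).items := rfl

-- refIndex characterisation
theorem pvFoldlConstD {α β : Type} (step : PySem.Dict String (List β) → α → PySem.Dict String (List β))
    (k : String) (hs : ∀ d x, (step d x).getD k [] = d.getD k []) :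
    ∀ (l : List α) d, (l.foldl step d).getD k [] = d.getD k [] := by
  intro l
  induction l with
  | nil => intro d; simp
  | cons x xs ih => intro d; rw [List.foldl_cons, ih, hs]

theorem refsB_getD (k : String) (t : Int × Int) (refs : List String) (d : PySem.Dict String (List (Int × Int))) :
    (refs.foldl (fun d ref => d.modify ref [] (fun l => l ++ [t])) d).getD k []
      = d.getD k [] ++ refs.flatMap (fun ref => if ref = k then [t] else []) := by
  apply pvFoldlAppend
  intro d ref
  rw [PySem.Dict.getD_modify]
  by_cases h : ref = k
  · subst h; simp
  · rw [if_neg (Ne.symm h), if_neg h, List.append_nil]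

theorem refIndex_getD (commdct : List (List (List (String × List String)))) (k : String) :
    (pvRefIndex commdct).getD k [] = pvCollect commdct k := by
  unfold pvRefIndex pvCollect
  rw [PySem.List.enumerate_eq_map_pyRange commdct [], List.foldl_map]
  rw [pvFoldlAppend _ k
    (fun i => (PySem.List.pyRange 0 ((PySem.List.pyGetD commdct i []).length : Int) 1).flatMap (fun j =>
      match (PySem.Dict.mk (PySem.List.pyGetD (PySem.List.pyGetD commdct i []) j [])).get? "reference" with
      | some refs => refs.flatMap (fun ref => if ref = k then [(i, j)] else [])
      | none => []))
    ?_ _ PySem.Dict.empty]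
  · simp [PySem.List.len]
  · intro d i
    rw [PySem.List.enumerate_eq_map_pyRange (PySem.List.pyGetD commdct i []) [], List.foldl_map]
    rw [pvFoldlAppend _ k
      (fun j =>
        match (PySem.Dict.mk (PySem.List.pyGetD (PySem.List.pyGetD commdct i []) j [])).get? "reference" with
        | some refs => refs.flatMap (fun ref => if ref = k then [(i, j)] else [])
        | none => [])
      ?_ _ d]
    · simp [PySem.List.len]
    · intro d j
      cases h : (PySem.Dict.mk (PySem.List.pyGetD (PySem.List.pyGetD commdct i []) j [])).get? "reference" with
      | some refs => simp only [h, refsB_getD]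
      | none => simp [h]

-- inner loop of A's second pass
theorem refsA_getD_self (k : String) (t : String × Int) (refs : List String) (d : PySem.Dict String (List (String × Int))) :
    (refs.foldl (fun d ref => if ref = k then d.modify k [] (fun l => l ++ [t]) else d) d).getD k []
      = d.getD k [] ++ refs.flatMap (fun ref => if ref = k then [t] else []) := by
  apply pvFoldlAppend
  intro d ref
  split_ifs with h
  · rw [PySem.Dict.getD_modify, if_pos rfl]
  · simp

theorem innerA_getD_self (blocklst : List (List String)) (commdct : List (List (List (String × List String))))
    (k : String) (d : PySem.Dict String (List (String × Int))) :
    (pvInnerA blocklst commdct k d).getD k [] = d.getD k [] ++ pvResolve blocklst (pvCollect commdct k) := by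
  unfold pvInnerA
  rw [pvFoldlAppend _ k
    (fun i => (PySem.List.pyRange 0 ((PySem.List.pyGetD commdct i []).length : Int) 1).flatMap (fun j =>
      match (PySem.Dict.mk (PySem.List.pyGetD (PySem.List.pyGetD commdct i []) j [])).get? "reference" with
      | some refs => refs.flatMap (fun ref =>
          if ref = k then [(PySem.List.pyGetD (PySem.List.pyGetD blocklst i []) 0 "", j)] else [])
      | none => []))
    ?_ _ d]
  · congr 1
    unfold pvResolve pvCollect
    rw [List.map_flatMap]
    congr 1
    funext i
    rw [List.map_flatMap]
    congr 1
    funext j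
    cases h : (PySem.Dict.mk (PySem.List.pyGetD (PySem.List.pyGetD commdct i []) j [])).get? "reference" with
    | some refs =>
      simp only [List.map_flatMap]
      congr 1
      funext ref
      split_ifs <;> simp
    | none => simp
  · intro d i
    rw [pvFoldlAppend _ k
      (fun j =>
        match (PySem.Dict.mk (PySem.List.pyGetD (PySem.List.pyGetD commdct i []) j [])).get? "reference" with
        | some refs => refs.flatMap (fun ref =>
            if ref = k then [(PySem.List.pyGetD (PySem.List.pyGetD blocklst i []) 0 "", j)] else [])
        | none => [])
      ?_ _ d]
    intro d j
    cases h : (PySem.Dict.mk (PySem.List.pyGetD (PySem.List.pyGetD commdct i []) j [])).get? "reference" with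
    | some refs => simp only [h, refsA_getD_self]
    | none => simp [h]

theorem innerA_getD_other (blocklst : List (List String)) (commdct : List (List (List (String × List String))))
    (k : String) (d : PySem.Dict String (List (String × Int))) (k' : String) (h : k' ≠ k) :
    (pvInnerA blocklst commdct k d).getD k' [] = d.getD k' [] := by
  unfold pvInnerA
  apply pvFoldlConstD
  intro d i
  apply pvFoldlConstD
  intro d j
  cases hr : (PySem.Dict.mk (PySem.List.pyGetD (PySem.List.pyGetD commdct i []) j [])).get? "reference" with
  | some refs =>
    apply pvFoldlConstD
    intro d ref
    split_ifs with he
    · rw [PySem.Dict.getD_modify, if_neg h]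
    · rfl
  | none => simp

theorem innerA_keys (blocklst : List (List String)) (commdct : List (List (List (String × List String))))
    (k : String) (d : PySem.Dict String (List (String × Int))) (h : k ∈ d.keys) :
    (pvInnerA blocklst commdct k d).keys = d.keys := by
  unfold pvInnerA
  apply pvFoldlKeys _ k _ _ _ h
  intro d i hk
  apply pvFoldlKeys _ k _ _ _ hk
  intro d j hk
  cases hr : (PySem.Dict.mk (PySem.List.pyGetD (PySem.List.pyGetD commdct i []) j [])).get? "reference" with
  | some refs =>
    apply pvFoldlKeys _ k _ _ _ hk
    intro d ref hk
    split_ifs with he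
    · rw [PySem.Dict.keys_modify,
        PySem.Dict.keys_insert_of_contains _ _ ((PySem.Dict.contains_iff_mem_keys d k).mpr hk)]
    · rfl
  | none => simp

-- A's whole second pass
theorem secondA (blocklst : List (List String)) (commdct : List (List (List (String × List String)))) :
    ∀ (ks : List String) (d : PySem.Dict String (List (String × Int))), ks.Nodup → (∀ k ∈ ks, k ∈ d.keys) →
      (ks.foldl (fun d k => pvInnerA blocklst commdct k d) d).keys = d.keys ∧
      ∀ k', (ks.foldl (fun d k => pvInnerA blocklst commdct k d) d).getD k' [] =
        d.getD k' [] ++ (if k' ∈ ks then pvResolve blocklst (pvCollect commdct k') else []) := by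
  intro ks
  induction ks with
  | nil => intro d _ _; simp
  | cons k ks ih =>
    intro d hnd hsub
    have hk : k ∈ d.keys := hsub k (List.mem_cons_self ..)
    have hkeys1 : (pvInnerA blocklst commdct k d).keys = d.keys := innerA_keys _ _ _ _ hk
    have hsub' : ∀ k' ∈ ks, k' ∈ (pvInnerA blocklst commdct k d).keys := by
      intro k' hk'; rw [hkeys1]; exact hsub k' (List.mem_cons_of_mem _ hk')
    obtain ⟨ihk, ihv⟩ := ih (pvInnerA blocklst commdct k d) hnd.of_cons hsub'
    constructor
    · rw [List.foldl_cons, ihk, hkeys1]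
    · intro k'
      rw [List.foldl_cons, ihv k']
      by_cases hek : k' = k
      · subst hek
        have hnotin : k' ∉ ks := (List.nodup_cons.mp hnd).1
        rw [innerA_getD_self, if_neg hnotin, if_pos (List.mem_cons_self ..), List.append_nil]
      · rw [innerA_getD_other _ _ _ _ _ hek]
        by_cases hin : k' ∈ ks
        · rw [if_pos hin, if_pos (List.mem_cons_of_mem _ hin)]
        · rw [if_neg hin, if_neg (by simp [hek, hin])]

-- key-pass lemmas
theorem pvInsert_keys_congr {d d' : PySem.Dict String (List (String × Int))} (k : String)
    (v w : List (String × Int)) (h : d.keys = d'.keys) :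
    (d.insert k v).keys = (d'.insert k w).keys := by
  by_cases hc : k ∈ d.keys
  · rw [PySem.Dict.keys_insert_of_contains _ _ ((PySem.Dict.contains_iff_mem_keys d k).mpr hc),
      PySem.Dict.keys_insert_of_contains _ _ ((PySem.Dict.contains_iff_mem_keys d' k).mpr (h ▸ hc))]
    exact h
  · rw [PySem.Dict.keys_insert_of_not_contains _ _ (by
        rw [PySem.Dict.contains_eq_decide_mem_keys]; simp [hc]),
      PySem.Dict.keys_insert_of_not_contains _ _ (by
        rw [PySem.Dict.contains_eq_decide_mem_keys]; simp [h ▸ hc])]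
    rw [h]

theorem pvPass_keys (commdct : List (List (List (String × List String))))
    (F G : String → List (String × Int)) : (pvPass commdct F).keys = (pvPass commdct G).keys := by
  unfold pvPass
  apply pvFoldlRel (fun (d d' : PySem.Dict String (List (String × Int))) => d.keys = d'.keys) _ _ ?_ commdct _ _ rfl
  intro b c eli hbc
  apply pvFoldlRel (fun (d d' : PySem.Dict String (List (String × Int))) => d.keys = d'.keys) _ _ ?_ eli _ _ hbc
  intro b c elj hbc
  cases h : (PySem.Dict.mk elj).get? "object-list" with
  | some v =>
    simp only []
    cases h0 : PySem.List.pyGet? v 0 with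
    | some objlist => exact pvInsert_keys_congr _ _ _ hbc
    | none => simpa [h0] using hbc
  | none => simpa [h] using hbc

theorem pvPass_nodup (commdct : List (List (List (String × List String))))
    (F : String → List (String × Int)) : (pvPass commdct F).keys.Nodup := by
  unfold pvPass
  apply pvFoldlInv (fun (d : PySem.Dict String (List (String × Int))) => d.keys.Nodup) _ ?_ commdct _ (by simp)
  intro b eli hb
  apply pvFoldlInv (fun (d : PySem.Dict String (List (String × Int))) => d.keys.Nodup) _ ?_ eli _ hb
  intro b elj hb
  cases h : (PySem.Dict.mk elj).get? "object-list" with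
  | some v =>
    simp only []
    cases h0 : PySem.List.pyGet? v 0 with
    | some objlist => exact PySem.Dict.nodup_keys_insert _ _ _ hb
    | none => simpa [h0] using hb
  | none => simpa [h] using hb

theorem pvPass_vals (commdct : List (List (List (String × List String))))
    (F : String → List (String × Int)) :
    ∀ k ∈ (pvPass commdct F).keys, (pvPass commdct F).getD k [] = F k := by
  unfold pvPass
  apply pvFoldlInv (fun (d : PySem.Dict String (List (String × Int))) => ∀ k ∈ d.keys, d.getD k [] = F k) _ ?_ commdct _ (by simp)
  intro b eli hb
  apply pvFoldlInv (fun (d : PySem.Dict String (List (String × Int))) => ∀ k ∈ d.keys, d.getD k [] = F k) _ ?_ eli _ hb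
  intro b elj hb
  cases h : (PySem.Dict.mk elj).get? "object-list" with
  | some v =>
    simp only []
    cases h0 : PySem.List.pyGet? v 0 with
    | some objlist =>
      simp only []
      intro k hk
      rw [PySem.Dict.getD_insert]
      rcases (PySem.Dict.mem_keys_insert _ _ _ _).mp hk with he | hm
      · rw [if_pos he, he]
      · by_cases he : k = objlist
        · rw [if_pos he, he]
        · rw [if_neg he]; exact hb k hm
    | none => simpa [h0] using hb
  | none => simpa [h] using hb

-- ===== VERDICT (by name: the statement is the Claim_ definition above) =====
theorem getobjectref_spec : Claim_equal_getobjectref := by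
  intro blocklst commdct _ _
  unfold Spec_getobjectref
  rw [portA_eq, portB_eq]
  have hnd0 := pvPass_nodup commdct (fun _ => [])
  obtain ⟨hkeys, hval⟩ :=
    secondA blocklst commdct (pvPass commdct (fun _ => [])).keys (pvPass commdct (fun _ => []))
      hnd0 (fun _ hk => hk)
  have hkB := pvPass_keys commdct (fun _ => [])
    (fun k => pvResolve blocklst ((pvRefIndex commdct).getD k []))
  rw [PySem.Dict.items_eq_map_keys _ (by rw [hkeys]; exact hnd0) [],
    PySem.Dict.items_eq_map_keys _
      (pvPass_nodup commdct (fun k => pvResolve blocklst ((pvRefIndex commdct).getD k []))) [],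
    hkeys, ← hkB]
  apply List.map_congr_left
  intro k hk
  rw [hval k, if_pos hk,
    pvPass_vals commdct (fun _ => []) k hk,
    pvPass_vals commdct (fun k => pvResolve blocklst ((pvRefIndex commdct).getD k [])) k (hkB ▸ hk),
    refIndex_getD]
  simp
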